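-- pv_equiv track=rewrite | github.com/Dimasuz/HW_4.2 | main.py | not_duble
-- ===== SOURCE A (Python) =====
-- from operator import itemgetter
--
-- def not_duble(c_l):
--   c_l = sorted(c_l, key=itemgetter(0, 1))
--   cl = c_l
--   for i in range(len(cl)-1, 0, -1):
--     if cl[i][0] == cl[i-1][0] and cl[i][1] == cl[i-1][1]:
--       for k in range(len(c_l[i])):
--         if c_l[i][k] == '' or c_l[i-1][k] == '':
--           c_l[i-1][k] += c_l[i][k]
--       del c_l[i]
--   return c_l
-- ===== SOURCE B (Python) =====
-- def not_duble(c_l):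
--     out = []
--     for row in sorted(c_l, key=lambda r: (r[0], r[1])):
--         if out and out[-1][0] == row[0] and out[-1][1] == row[1]:
--             last = out[-1]
--             out[-1] = [a if a else b for a, b in zip(last, row)] + last[len(row):]
--         else:
--             out.append(row)
--     return out
-- ===== Notes on version B (the rewrite author's own statement) =====
-- stated objective: simpler
-- what changed: A sorts and then walks indices backwards over one mutable list, merging duplicate-key neighbours into the previous row cell-by-cell and deleting them with del; B sorts once and does a single forward pass that appends each row to the output or merges it into the last kept row with a zip comprehension, so all index arithmetic and in-place deletion disappears.
import Mathlib
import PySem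

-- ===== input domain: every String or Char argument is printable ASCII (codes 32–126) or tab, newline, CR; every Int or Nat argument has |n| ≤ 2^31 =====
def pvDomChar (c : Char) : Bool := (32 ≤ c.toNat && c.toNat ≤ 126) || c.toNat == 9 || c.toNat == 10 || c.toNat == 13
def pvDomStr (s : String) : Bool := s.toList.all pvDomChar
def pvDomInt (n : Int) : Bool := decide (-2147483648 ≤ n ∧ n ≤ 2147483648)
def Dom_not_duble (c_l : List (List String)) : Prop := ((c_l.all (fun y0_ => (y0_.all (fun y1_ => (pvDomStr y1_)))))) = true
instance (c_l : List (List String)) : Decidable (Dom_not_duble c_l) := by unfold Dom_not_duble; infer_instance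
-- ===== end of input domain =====

-- B replaces A's backward index loop with `del` by a single forward pass that appends to the
-- output or merges into the last kept row; Python A mutates the input's row lists in place,
-- B does not — the equivalence proved here is about the RETURN value only.

-- ===== PORT A =====
-- sorted(c_l, key=itemgetter(0, 1)); itemgetter ported with a total default — exact under
-- Pre_not_duble, which guarantees every row has length ≥ 2
def pvSortA (c_l : List (List String)) : List (List String) :=
  PySem.List.sorted2 c_l (fun r => PySem.List.pyGetD r 0 "") (fun r => PySem.List.pyGetD r 1 "")

-- inner loop: for k in range(len(c_l[i])): if c_l[i][k] == '' or c_l[i-1][k] == '': c_l[i-1][k] += c_l[i][k]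
-- (rj is row i-1, ri is row i; pySetD/pyGetD are exact for the in-range indices Pre_ guarantees)
def pvMergeA (rj ri : List String) : List String :=
  (PySem.List.pyRange 0 ri.length 1).foldl
    (fun rj k =>
      if PySem.List.pyGetD ri k "" = "" ∨ PySem.List.pyGetD rj k "" = "" then
        PySem.List.pySetD rj k (PySem.List.pyGetD rj k "" ++ PySem.List.pyGetD ri k "")
      else rj) rj

-- one iteration of the outer loop body at index i (del c_l[i] = eraseIdx; i is in range 1 ≤ i < len cl
-- throughout the loop, where eraseIdx i.toNat is exactly Python's del)
def pvStepA (cl : List (List String)) (i : Int) : List (List String) :=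
  let ri := PySem.List.pyGetD cl i []
  let rj := PySem.List.pyGetD cl (i - 1) []
  if PySem.List.pyGetD ri 0 "" = PySem.List.pyGetD rj 0 "" ∧
     PySem.List.pyGetD ri 1 "" = PySem.List.pyGetD rj 1 "" then
    (PySem.List.pySetD cl (i - 1) (pvMergeA rj ri)).eraseIdx i.toNat
  else cl

def not_duble (c_l : List (List String)) : List (List String) :=
  let cl := pvSortA c_l
  (PySem.List.pyRange ((cl.length : Int) - 1) 0 (-1)).foldl pvStepA cl

-- ===== PORT B =====
-- out[-1] = [a if a else b for a, b in zip(last, row)] + last[len(row):]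
def pvMergeB (last row : List String) : List String :=
  (List.zipWith (fun a b => if a = "" then b else a) last row) ++ last.drop row.length

-- one iteration of B's forward loop: merge into the last kept row or append
def pvStepB (out : List (List String)) (row : List String) : List (List String) :=
  match out.getLast? with
  | some last =>
      if PySem.List.pyGetD last 0 "" = PySem.List.pyGetD row 0 "" ∧
         PySem.List.pyGetD last 1 "" = PySem.List.pyGetD row 1 "" then
        out.dropLast ++ [pvMergeB last row]
      else out ++ [row]
  | none => out ++ [row]

def not_duble_alt (c_l : List (List String)) : List (List String) :=
  (PySem.List.sorted2 c_l (fun r => PySem.List.pyGetD r 0 "") (fun r => PySem.List.pyGetD r 1 "")).foldl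
    pvStepB []

-- ===== PRECONDITION & SPEC =====
-- Pre_ is exactly where Python A returns: every row needs ≥ 2 fields (itemgetter(0,1) raises
-- IndexError otherwise), and whenever an earlier row and a later row agree on their first two
-- fields the later row must not be longer (the merge loop reads/writes the earlier row at the
-- later row's indices and raises IndexError otherwise; the sort is stable, so original order
-- within a duplicate group is what the merge sees).
def Pre_not_duble (c_l : List (List String)) : Prop :=
  (∀ r ∈ c_l, 2 ≤ r.length) ∧
  c_l.Pairwise (fun a b =>
    (PySem.List.pyGetD a 0 "" = PySem.List.pyGetD b 0 "" ∧
     PySem.List.pyGetD a 1 "" = PySem.List.pyGetD b 1 "") → b.length ≤ a.length)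
instance (c_l : List (List String)) : Decidable (Pre_not_duble c_l) := by
  unfold Pre_not_duble; infer_instance

def pvWitness_not_duble : List (List String) :=
  [["a", "b", "x", ""], ["c", "d", "y"], ["a", "b", "", "z"]]

def Spec_not_duble (c_l : List (List String)) (out : List (List String)) : Prop := out = not_duble_alt c_l
instance (c_l : List (List String)) (out : List (List String)) : Decidable (Spec_not_duble c_l out) := by unfold Spec_not_duble; infer_instance

-- ===== CLAIM (what is proved, stated in full; the proofs are below) =====
def Claim_equal_not_duble : Prop := ∀ (c_l : List (List String)), Dom_not_duble c_l → Pre_not_duble c_l → Spec_not_duble c_l (not_duble c_l)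

-- ===== LEMMAS AND PROOFS =====

-- the (row[0], row[1]) key both programs compare on (total via the same default as the ports)
def pvKey (r : List String) : String × String :=
  (PySem.List.pyGetD r 0 "", PySem.List.pyGetD r 1 "")

-- equal keys force the later row to be no longer (the relation Pre_ states)
def pvS (a b : List String) : Prop := pvKey a = pvKey b → b.length ≤ a.length

-- the merged run: fold B's merge over a maximal block, emitting a row when the key changes
def pvRun : List String → List (List String) → List (List String)
  | x, [] => [x]
  | x, y :: t => if pvKey x = pvKey y then pvRun (pvMergeB x y) t else x :: pvRun y t

def pvRunL : List (List String) → List (List String)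
  | [] => []
  | x :: t => pvRun x t

-- the strict lexicographic "before" test sorted2 uses on our two keys
def pvLt (a b : List String) : Bool :=
  decide (PySem.List.pyGetD a 0 "" < PySem.List.pyGetD b 0 "") ||
  (!decide (PySem.List.pyGetD b 0 "" < PySem.List.pyGetD a 0 "") &&
   decide (PySem.List.pyGetD a 1 "" < PySem.List.pyGetD b 1 ""))

lemma pvKey_def (r : List String) : pvKey r = (r.getD 0 "", r.getD 1 "") := by
  simp [pvKey, PySem.List.pyGetD_ofNat']

lemma pvKey_eq_iff (a b : List String) :
    pvKey a = pvKey b ↔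
      (PySem.List.pyGetD a 0 "" = PySem.List.pyGetD b 0 "" ∧
       PySem.List.pyGetD a 1 "" = PySem.List.pyGetD b 1 "") := by
  simp [pvKey, Prod.ext_iff]

lemma pvPre_pairwise {c_l : List (List String)} (h : Pre_not_duble c_l) :
    c_l.Pairwise pvS := by
  refine h.2.imp ?_
  intro a b hab hk
  exact hab ((pvKey_eq_iff a b).mp hk)

-- ---- structural equations for pvMergeB ----
@[simp] lemma mergeB_nil_left (y : List String) : pvMergeB [] y = [] := by
  simp [pvMergeB]

@[simp] lemma mergeB_nil_right (x : List String) : pvMergeB x [] = x := by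
  simp [pvMergeB]

@[simp] lemma mergeB_cons (a b : String) (x y : List String) :
    pvMergeB (a :: x) (b :: y) = (if a = "" then b else a) :: pvMergeB x y := by
  simp [pvMergeB]

@[simp] lemma length_mergeB (x y : List String) : (pvMergeB x y).length = x.length := by
  induction x generalizing y with
  | nil => simp
  | cons a x ih => cases y <;> simp [ih]

lemma getD0_mergeB (x y : List String) (h : x.getD 0 "" = y.getD 0 "") :
    (pvMergeB x y).getD 0 "" = x.getD 0 "" := by
  cases x with
  | nil => simp
  | cons a x =>
    cases y with
    | nil => simp
    | cons b y =>
      simp at h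
      subst h
      simp only [mergeB_cons, List.getD_cons_zero]
      split <;> simp_all

lemma getD1_mergeB (x y : List String) (h : x.getD 1 "" = y.getD 1 "") :
    (pvMergeB x y).getD 1 "" = x.getD 1 "" := by
  cases x with
  | nil => simp
  | cons a x =>
    cases y with
    | nil => simp
    | cons b y =>
      simp only [mergeB_cons]
      have e : ∀ (c : String) (l : List String), (c :: l).getD 1 "" = l.getD 0 "" := by
        intro c l; cases l <;> simp
      rw [e, e]
      rw [e, e] at h
      exact getD0_mergeB x y h

lemma key_mergeB (x y : List String) (h : pvKey x = pvKey y) :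
    pvKey (pvMergeB x y) = pvKey x := by
  simp only [pvKey_def, Prod.mk.injEq] at h ⊢
  exact ⟨getD0_mergeB x y h.1, getD1_mergeB x y h.2⟩

lemma mergeB_assoc (x y z : List String) (hz : z.length ≤ y.length) :
    pvMergeB x (pvMergeB y z) = pvMergeB (pvMergeB x y) z := by
  induction x generalizing y z with
  | nil => simp
  | cons a x ih =>
    cases y with
    | nil =>
      have : z = [] := List.length_eq_zero_iff.mp (Nat.le_zero.mp (by simpa using hz))
      subst this
      simp
    | cons b y =>
      cases z with
      | nil => simp
      | cons c z =>
        simp only [mergeB_cons]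
        simp only [List.length_cons, Nat.add_le_add_iff_right] at hz
        rw [ih y z hz]
        congr 1
        by_cases ha : a = "" <;> by_cases hb : b = "" <;> simp [ha, hb]

-- ---- A's in-place fill loop equals B's comprehension merge ----
-- A's inner loop re-indexed over Nat (after pyRange/pyGetD/pySetD are discharged)
def pvStepN (y r : List String) (k : Nat) : List String :=
  if y.getD k "" = "" ∨ r.getD k "" = "" then r.set k (r.getD k "" ++ y.getD k "") else r

lemma mergeA_eq_fold (x y : List String) :
    pvMergeA x y = (List.range y.length).foldl (pvStepN y) x := by
  unfold pvMergeA
  rw [PySem.List.pyRange_one, List.foldl_map]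
  simp only [sub_zero, Int.toNat_natCast]
  congr 1
  funext r k
  simp [pvStepN, PySem.List.pyGetD_natCast, PySem.List.pySetD_natCast,
    List.getD_eq_getElem?_getD]

lemma stepN_take : ∀ (x y : List String) (j : Nat), j < y.length → y.length ≤ x.length →
    pvStepN y (pvMergeB x (y.take j)) j = pvMergeB x (y.take (j + 1))
  | a :: x, b :: y, 0, _, _ => by
    simp only [List.take_zero, mergeB_nil_right, List.take_succ_cons, List.take_zero,
      mergeB_cons, pvStepN, List.getD_cons_zero]
    by_cases hb : b = "" <;> by_cases ha : a = "" <;>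
      simp [ha, hb, String.append_empty, String.empty_append]
  | a :: x, b :: y, j + 1, hj, hxy => by
    simp only [List.take_succ_cons, mergeB_cons, pvStepN, List.getD_cons_succ,
      List.set_cons_succ]
    have hj' : j < y.length := by simpa using hj
    have hxy' : y.length ≤ x.length := by simpa using hxy
    have := stepN_take x y j hj' hxy'
    simp only [pvStepN] at this
    split <;> simp_all
  | [], y, j, hj, hxy => by
    simp only [List.length_nil, Nat.le_zero, List.length_eq_zero_iff] at hxy
    subst hxy
    simp at hj
  | a :: x, [], j, hj, _ => by simp at hj

lemma mergeA_eq (x y : List String) (h : y.length ≤ x.length) : pvMergeA x y = pvMergeB x y := by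
  rw [mergeA_eq_fold]
  have H : ∀ j, j ≤ y.length → (List.range j).foldl (pvStepN y) x = pvMergeB x (y.take j) := by
    intro j
    induction j with
    | zero => simp
    | succ j ih =>
      intro hj
      rw [List.range_succ, List.foldl_append, ih (by omega)]
      simpa using stepN_take x y j (by omega) h
  simpa using H y.length le_rfl

-- ---- pvRun: head shape and merging the leader in ----
lemma run_shape : ∀ (t : List (List String)) (x : List String),
    ∃ h t', pvRun x t = h :: t' ∧ pvKey h = pvKey x ∧ h.length = x.length
  | [], x => ⟨x, [], rfl, rfl, rfl⟩
  | y :: t, x => by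
    by_cases hk : pvKey x = pvKey y
    · obtain ⟨h, t', he, hkey, hlen⟩ := run_shape t (pvMergeB x y)
      exact ⟨h, t', by simp [pvRun, hk, he],
        by rw [hkey, key_mergeB x y hk], by rw [hlen, length_mergeB]⟩
    · exact ⟨x, pvRun y t, by simp [pvRun, hk], rfl, rfl⟩

lemma run_assoc : ∀ (t : List (List String)) (y x : List String),
    pvKey x = pvKey y →
    (∀ z ∈ t, pvKey y = pvKey z → z.length ≤ y.length) →
    ∀ h t', pvRun y t = h :: t' → pvRun (pvMergeB x y) t = pvMergeB x h :: t'
  | [], y, x, hxy, _, h, t', he => by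
    obtain ⟨rfl, rfl⟩ := List.cons_eq_cons.mp he
    rfl
  | z :: t, y, x, hxy, hp, h, t', he => by
    have hkxy : pvKey (pvMergeB x y) = pvKey x := key_mergeB x y hxy
    by_cases hk : pvKey y = pvKey z
    · have hzy : z.length ≤ y.length := hp z (by simp) hk
      have he' : pvRun (pvMergeB y z) t = h :: t' := by simpa [pvRun, hk] using he
      have hk' : pvKey (pvMergeB x y) = pvKey z := by rw [hkxy, hxy, hk]
      have hxy' : pvKey x = pvKey (pvMergeB y z) := by rw [key_mergeB y z hk, hxy]
      have hp' : ∀ w ∈ t, pvKey (pvMergeB y z) = pvKey w → w.length ≤ (pvMergeB y z).length := by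
        intro w hw hkw
        rw [length_mergeB]
        exact hp w (by simp [hw]) (by rw [← key_mergeB y z hk]; exact hkw)
      have ih := run_assoc t (pvMergeB y z) x hxy' hp' h t' he'
      rw [mergeB_assoc x y z hzy] at ih
      simp only [pvRun, hk', if_pos]
      exact ih
    · have hk' : ¬ pvKey (pvMergeB x y) = pvKey z := by rw [hkxy, hxy]; exact hk
      simp only [pvRun, if_neg hk] at he
      obtain ⟨rfl, rfl⟩ := List.cons_eq_cons.mp he
      simp [pvRun, hk']

-- ---- B's fold is pvRun ----
lemma stepB_concat (acc : List (List String)) (x row : List String) :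
    pvStepB (acc ++ [x]) row =
      if pvKey x = pvKey row then acc ++ [pvMergeB x row] else (acc ++ [x]) ++ [row] := by
  simp only [pvStepB, List.getLast?_concat, List.dropLast_concat, pvKey_eq_iff]

lemma foldlB : ∀ (t : List (List String)) (acc : List (List String)) (x : List String),
    List.foldl pvStepB (acc ++ [x]) t = acc ++ pvRun x t
  | [], acc, x => by simp [pvRun]
  | row :: t, acc, x => by
    rw [List.foldl_cons, stepB_concat]
    by_cases hk : pvKey x = pvKey row
    · rw [if_pos hk, foldlB t acc (pvMergeB x row)]
      simp [pvRun, hk]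
    · rw [if_neg hk, foldlB t (acc ++ [x]) row]
      simp [pvRun, hk]

lemma alt_eq_runL (c_l : List (List String)) : not_duble_alt c_l = pvRunL (pvSortA c_l) := by
  show List.foldl pvStepB [] (pvSortA c_l) = _
  cases h : pvSortA c_l with
  | nil => simp [pvRunL]
  | cons x t =>
    have h0 : pvStepB [] x = [] ++ [x] := by simp [pvStepB]
    rw [List.foldl_cons, h0, foldlB]
    simp [pvRunL]

-- ---- A's backward loop is pvRunL ----
lemma stepA_eq (s : List (List String)) (hpair : s.Pairwise pvS) (j : Nat)
    (h1 : 1 ≤ j) (h2 : j < s.length) :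
    pvStepA (s.take j ++ pvRunL (s.drop j)) (j : Int) =
      s.take (j - 1) ++ pvRunL (s.drop (j - 1)) := by
  have hjlt : j - 1 < s.length := by omega
  have hdrop : s.drop j = s[j] :: s.drop (j + 1) := List.drop_eq_getElem_cons h2
  have hsub : (s.drop j).Pairwise pvS := List.Pairwise.sublist (List.drop_sublist j s) hpair
  rw [hdrop, List.pairwise_cons] at hsub
  have hp : ∀ z ∈ s.drop (j + 1), pvKey s[j] = pvKey z → z.length ≤ s[j].length :=
    fun z hz hk => hsub.1 z hz hk
  obtain ⟨hd, t', hrun, hkey, hlen⟩ := run_shape (s.drop (j + 1)) s[j]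
  have hRL : pvRunL (s.drop j) = hd :: t' := by rw [hdrop]; simpa [pvRunL] using hrun
  have htlen : (s.take j).length = j := by simp [List.length_take]; omega
  have htlen1 : (s.take (j - 1)).length = j - 1 := by simp [List.length_take]; omega
  have hri : PySem.List.pyGetD (s.take j ++ pvRunL (s.drop j)) (j : Int) [] = hd := by
    rw [PySem.List.pyGetD_natCast, hRL, List.getD_eq_getElem?_getD,
      List.getElem?_append_right (by omega)]
    simp [htlen]
  have hc1 : (j : Int) - 1 = ((j - 1 : Nat) : Int) := by omega
  have hrj : PySem.List.pyGetD (s.take j ++ pvRunL (s.drop j)) ((j : Int) - 1) [] = s[j - 1] := by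
    rw [hc1, PySem.List.pyGetD_natCast, List.getD_eq_getElem?_getD,
      List.getElem?_append_left (by omega), List.getElem?_take]
    rw [if_pos (by omega), List.getElem?_eq_getElem hjlt]
    rfl
  have htake : s.take j = s.take (j - 1) ++ [s[j - 1]] := by
    conv_lhs => rw [show j = (j - 1) + 1 by omega]
    rw [List.take_succ, List.getElem?_eq_getElem hjlt]
    rfl
  have hdrop1 : s.drop (j - 1) = s[j - 1] :: s.drop j := by
    have hh := List.drop_eq_getElem_cons (l := s) (i := j - 1) hjlt
    rw [show j - 1 + 1 = j by omega] at hh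
    exact hh
  have hSj : pvS s[j - 1] s[j] :=
    List.pairwise_iff_getElem.mp hpair (j - 1) j hjlt h2 (by omega)
  simp only [pvStepA, hri, hrj]
  by_cases hcond : pvKey hd = pvKey s[j - 1]
  · rw [if_pos ((pvKey_eq_iff hd s[j - 1]).mp hcond)]
    have hk' : pvKey s[j - 1] = pvKey s[j] := hcond.symm.trans hkey
    have hlen2 : s[j].length ≤ s[j - 1].length := hSj hk'
    have hmA : pvMergeA s[j - 1] hd = pvMergeB s[j - 1] hd :=
      mergeA_eq _ _ (by rw [hlen]; exact hlen2)
    rw [hmA, hc1, PySem.List.pySetD_natCast, Int.toNat_natCast, hRL, htake,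
      List.append_assoc, List.cons_append, List.nil_append]
    have hset : (s.take (j - 1) ++ s[j - 1] :: (hd :: t')).set (j - 1) (pvMergeB s[j - 1] hd) =
        s.take (j - 1) ++ pvMergeB s[j - 1] hd :: (hd :: t') := by
      rw [List.set_append, if_neg (by omega)]
      congr 1
      rw [show j - 1 - (s.take (j - 1)).length = 0 by omega]
      rfl
    rw [hset]
    have herase : (s.take (j - 1) ++ pvMergeB s[j - 1] hd :: hd :: t').eraseIdx j =
        s.take (j - 1) ++ pvMergeB s[j - 1] hd :: t' := by
      rw [List.eraseIdx_append, if_neg (by omega)]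
      congr 1
      rw [show j - (s.take (j - 1)).length = 1 by omega]
      rfl
    rw [herase, hdrop1, hdrop]
    have hras := run_assoc (s.drop (j + 1)) s[j] s[j - 1] hk' hp hd t' hrun
    simp only [pvRunL, pvRun, hk', if_pos]
    rw [hras]
  · rw [if_neg (fun hc => hcond ((pvKey_eq_iff hd s[j - 1]).mpr hc))]
    have hk' : ¬ pvKey s[j - 1] = pvKey s[j] := fun he => hcond (hkey.trans he.symm)
    rw [hdrop1, hdrop]
    simp only [pvRunL, pvRun, hk', if_neg, ite_false]
    rw [htake]
    simp
    rw [show j - 1 + 1 = j by omega, htake, List.append_assoc, List.singleton_append]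

lemma A_loop (s : List (List String)) (hpair : s.Pairwise pvS) :
    ∀ (i : Nat), i < s.length →
      List.foldl pvStepA (s.take i ++ pvRunL (s.drop i)) (PySem.List.pyRange (i : Int) 0 (-1)) =
        pvRunL s := by
  intro i
  induction i with
  | zero =>
    intro _
    rw [PySem.List.pyRange_neg_one_eq_nil (by omega)]
    simp
  | succ i ih =>
    intro hi
    have hcast : (((i + 1 : Nat)) : Int) = (i : Int) + 1 := by push_cast; ring
    rw [hcast, PySem.List.pyRange_neg_one_cons (by omega), List.foldl_cons]
    have this1 : ((i : Int) + 1 - 1) = (i : Int) := by omega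
    rw [this1]
    have hstep := stepA_eq s hpair (i + 1) (by omega) hi
    rw [hcast] at hstep
    simp only [Nat.add_sub_cancel] at hstep
    rw [hstep]
    exact ih (by omega)

lemma a_eq_runL (c_l : List (List String)) (hpair : (pvSortA c_l).Pairwise pvS) :
    not_duble c_l = pvRunL (pvSortA c_l) := by
  show List.foldl pvStepA (pvSortA c_l) _ = _
  cases h : pvSortA c_l with
  | nil =>
    rw [PySem.List.pyRange_neg_one_eq_nil (by simp)]
    simp [pvRunL]
  | cons x t =>
    rw [h] at hpair
    have hinit : (x :: t).take t.length ++ pvRunL ((x :: t).drop t.length) = x :: t := by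
      have hd : (x :: t).drop t.length = [(x :: t)[t.length]] := by
        rw [List.drop_eq_getElem_cons (by simp)]
        simp
      rw [hd]
      simp only [pvRunL, pvRun]
      have ht := List.take_succ (l := x :: t) (i := t.length)
      rw [List.getElem?_eq_getElem (by simp)] at ht
      simpa using ht.symm
    have hcast : (((x :: t).length : Int) - 1) = ((t.length : Nat) : Int) := by
      simp
    rw [hcast]
    conv_lhs => rw [← hinit]
    exact A_loop (x :: t) hpair t.length (by simp)

-- ---- stability of sorted2: Pairwise pvS survives the sort ----
lemma sortA_eq_foldl (c_l : List (List String)) :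
    pvSortA c_l = c_l.foldl (fun acc x => PySem.List.insertBy pvLt x acc) [] := rfl

lemma pvLt_asymm {a b : List String} (h : pvLt a b = true) : pvLt b a = false := by
  simp only [pvLt, Bool.or_eq_true, Bool.and_eq_true, Bool.not_eq_true', decide_eq_true_eq,
    decide_eq_false_iff_not, Bool.or_eq_false_iff, Bool.and_eq_false_iff,
    Bool.not_eq_false'] at h ⊢
  rcases h with h | ⟨h1, h2⟩
  · exact ⟨asymm h, Or.inl h⟩
  · exact ⟨fun hba => h1 hba, Or.inr (asymm h2)⟩

lemma pvLt_trans {a b c : List String} (h1 : pvLt a b = true) (h2 : pvLt b c = true) :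
    pvLt a c = true := by
  simp only [pvLt, Bool.or_eq_true, Bool.and_eq_true, Bool.not_eq_true', decide_eq_true_eq,
    decide_eq_false_iff_not] at h1 h2 ⊢
  rcases h1 with h1 | ⟨h1a, h1b⟩ <;> rcases h2 with h2 | ⟨h2a, h2b⟩
  · exact Or.inl (lt_trans h1 h2)
  · exact Or.inl (lt_of_lt_of_le h1 (not_lt.mp h2a))
  · exact Or.inl (lt_of_le_of_lt (not_lt.mp h1a) h2)
  · exact Or.inr ⟨fun hca => h1a (lt_of_le_of_lt (not_lt.mp h2a) hca), lt_trans h1b h2b⟩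

lemma pvLt_transMix {a b c : List String} (h1 : pvLt a c = true) (h2 : pvLt b c = false) :
    pvLt a b = true := by
  simp only [pvLt, Bool.or_eq_true, Bool.and_eq_true, Bool.not_eq_true', decide_eq_true_eq,
    decide_eq_false_iff_not, Bool.or_eq_false_iff, Bool.and_eq_false_iff,
    Bool.not_eq_false', decide_eq_true_iff] at h1 h2 ⊢
  obtain ⟨h2a, h2b⟩ := h2
  rcases h1 with h1 | ⟨h1a, h1b⟩
  · exact Or.inl (lt_of_lt_of_le h1 (not_lt.mp h2a))
  · rcases h2b with h | h
    · exact Or.inl (lt_of_le_of_lt (not_lt.mp h1a) h)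
    · exact Or.inr ⟨fun hba => h2a (lt_of_lt_of_le hba (not_lt.mp h1a)),
        lt_of_lt_of_le h1b (not_lt.mp h)⟩

lemma pvLt_key_ne {a b : List String} (h : pvLt a b = true) : pvKey a ≠ pvKey b := by
  simp only [pvLt, Bool.or_eq_true, Bool.and_eq_true, Bool.not_eq_true', decide_eq_true_eq,
    decide_eq_false_iff_not] at h
  intro hk
  obtain ⟨e0, e1⟩ := (pvKey_eq_iff a b).mp hk
  rcases h with h | ⟨_, h⟩
  · rw [e0] at h; exact lt_irrefl _ h
  · rw [e1] at h; exact lt_irrefl _ h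

-- sortedness invariant of the insertion fold
lemma insertBy_Sle {acc : List (List String)} (x : List String)
    (h : acc.Pairwise (fun a b => pvLt b a = false)) :
    (PySem.List.insertBy pvLt x acc).Pairwise (fun a b => pvLt b a = false) := by
  induction acc with
  | nil => simp [PySem.List.insertBy]
  | cons y ys ih =>
    rw [List.pairwise_cons] at h
    by_cases hxy : pvLt x y = true
    · simp only [PySem.List.insertBy, hxy, if_true]
      refine List.Pairwise.cons ?_ (List.Pairwise.cons h.1 h.2)
      intro w hw
      rcases List.mem_cons.mp hw with rfl | hw
      · exact pvLt_asymm hxy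
      · cases hwx : pvLt w x with
        | false => rfl
        | true => exact absurd (pvLt_trans hwx hxy) (by simp [h.1 w hw])
    · simp only [PySem.List.insertBy, hxy, if_false, Bool.false_eq_true]
      refine List.Pairwise.cons ?_ (ih h.2)
      intro w hw
      rcases (PySem.List.mem_insertBy pvLt x w ys).mp hw with rfl | hw
      · simpa using hxy
      · exact h.1 w hw

lemma insertBy_S {acc : List (List String)} (x : List String)
    (hsle : acc.Pairwise (fun a b => pvLt b a = false))
    (hS : acc.Pairwise pvS) (hx : ∀ y ∈ acc, pvS y x) :
    (PySem.List.insertBy pvLt x acc).Pairwise pvS := by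
  induction acc with
  | nil => simp [PySem.List.insertBy]
  | cons y ys ih =>
    rw [List.pairwise_cons] at hsle hS
    by_cases hxy : pvLt x y = true
    · simp only [PySem.List.insertBy, hxy, if_true]
      refine List.Pairwise.cons ?_ (List.Pairwise.cons hS.1 hS.2)
      intro w hw hk
      exfalso
      rcases List.mem_cons.mp hw with rfl | hw
      · exact pvLt_key_ne hxy hk
      · exact pvLt_key_ne (pvLt_transMix hxy (hsle.1 w hw)) hk
    · simp only [PySem.List.insertBy, hxy, if_false, Bool.false_eq_true]
      refine List.Pairwise.cons ?_ (ih hsle.2 hS.2 (fun z hz => hx z (by simp [hz])))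
      intro w hw
      rcases (PySem.List.mem_insertBy pvLt x w ys).mp hw with rfl | hw
      · exact hx y (by simp)
      · exact hS.1 w hw

lemma sortA_pairwise (c_l : List (List String)) (h : c_l.Pairwise pvS) :
    (pvSortA c_l).Pairwise pvS := by
  rw [sortA_eq_foldl]
  suffices H : ∀ (xs acc : List (List String)),
      acc.Pairwise (fun a b => pvLt b a = false) → acc.Pairwise pvS →
      (∀ a ∈ acc, ∀ b ∈ xs, pvS a b) → xs.Pairwise pvS →
      (xs.foldl (fun acc x => PySem.List.insertBy pvLt x acc) acc).Pairwise pvS by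
    exact H c_l [] (by simp) (by simp) (by simp) h
  intro xs
  induction xs with
  | nil => intro acc _ h2 _ _; simpa using h2
  | cons x xs ih =>
    intro acc hsle hS hcross hxs
    rw [List.pairwise_cons] at hxs
    rw [List.foldl_cons]
    refine ih _ (insertBy_Sle x hsle)
      (insertBy_S x hsle hS (fun y hy => hcross y hy x (by simp))) ?_ hxs.2
    intro a ha b hb
    rcases (PySem.List.mem_insertBy pvLt x a acc).mp ha with rfl | ha
    · exact hxs.1 b hb
    · exact hcross a ha b (by simp [hb])

-- ===== VERDICT (by name: the statement is the Claim_ definition above) =====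
theorem not_duble_spec : Claim_equal_not_duble := by
  intro c_l _ hpre
  show not_duble c_l = not_duble_alt c_l
  have hpair := sortA_pairwise c_l (pvPre_pairwise hpre)
  rw [a_eq_runL c_l hpair, alt_eq_runL c_l]
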